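-- pv_equiv track=rewrite | github.com/dakn2005/advent_of_code | 2023/day14/part1.py | tiltNorthScore
-- ===== SOURCE A (Python) =====
-- def tiltNorthScore(rIdx, coords, matrix):
--     R = len(matrix)
--     if rIdx == 0:
--         return R - rIdx
--
--     i, j = coords[0], coords[1]
--     abv = 0
--
--     while True:
--         i -= 1
--         if matrix[i][j] == '#' or i < 0:
--             break
--
--         if matrix[i][j] == 'O' and i > 0:
--             rIdx += 1 - 1
--         elif matrix[i][j] == '.':
--             rIdx -= 1
--
--
--     return R - rIdx
-- ===== SOURCE B (Python) =====
-- def tiltNorthScore(rIdx, coords, matrix):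
--     R = len(matrix)
--     if rIdx == 0:
--         return R
--     j = coords[1]
--     col = [matrix[r][j] for r in range(coords[0])]
--     blk = -1
--     for r, cell in enumerate(col):
--         if cell == '#':
--             blk = r
--     return R - rIdx + col[blk + 1:].count('.')
-- ===== Notes on version B (the rewrite author's own statement) =====
-- stated objective: simpler
-- what changed: Replaces A's stateful upward while-loop (scan, break at '#', decrement an accumulator) by a three-step decomposition: build the column above the rock, locate the last '#' with a forward enumerate pass, then count '.' in the slice after it.
-- outside the precondition, e.g. on tiltNorthScore(1, [2, 1], [['.'], ['.', '#'], ['.', '.']]): A returns 2, B raises IndexError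
import Mathlib
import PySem

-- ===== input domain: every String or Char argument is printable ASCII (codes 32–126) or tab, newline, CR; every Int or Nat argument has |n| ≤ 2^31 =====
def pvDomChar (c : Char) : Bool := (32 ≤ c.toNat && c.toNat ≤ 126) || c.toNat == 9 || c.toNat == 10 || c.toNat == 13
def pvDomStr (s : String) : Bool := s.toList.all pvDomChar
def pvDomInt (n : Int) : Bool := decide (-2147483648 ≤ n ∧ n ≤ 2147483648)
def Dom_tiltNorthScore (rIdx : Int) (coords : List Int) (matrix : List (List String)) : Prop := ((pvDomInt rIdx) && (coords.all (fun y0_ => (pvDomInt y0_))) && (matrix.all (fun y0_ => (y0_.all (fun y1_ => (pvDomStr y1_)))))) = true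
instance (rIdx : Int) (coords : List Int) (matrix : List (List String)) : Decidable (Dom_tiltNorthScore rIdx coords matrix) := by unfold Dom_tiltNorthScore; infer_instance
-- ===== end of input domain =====

-- B replaces A's stateful upward scan-with-break by build-the-column / locate-last-block / count-dots (simpler decomposition, same cost).
-- Both ports read matrix[i][j] through this helper (Python indexing, negative i from the end; the default "?" is
-- only reached where the Python raises IndexError, which Pre_ excludes).
def pvCell (matrix : List (List String)) (j i : Int) : String :=
  ((PySem.List.pyGet? matrix i).bind (fun row => PySem.List.pyGet? row j)).getD "?"

-- ===== PORT A =====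
-- the 'while True' loop of A: fuel bounds the iteration count (i strictly decreases and the loop breaks at i < 0,
-- so coords[0].toNat + 1 iterations always suffice); this is a totality guard, not an algorithm change.
def tiltLoopA (matrix : List (List String)) (j : Int) : Nat → Int → Int → Int
  | 0, _, rIdx => rIdx
  | n + 1, i, rIdx =>
    let i' := i - 1
    if pvCell matrix j i' = "#" ∨ i' < 0 then rIdx
    else if pvCell matrix j i' = "O" ∧ i' > 0 then tiltLoopA matrix j n i' (rIdx + 1 - 1)
    else if pvCell matrix j i' = "." then tiltLoopA matrix j n i' (rIdx - 1)
    else tiltLoopA matrix j n i' rIdx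

def tiltNorthScore (rIdx : Int) (coords : List Int) (matrix : List (List String)) : Int :=
  let R : Int := matrix.length
  if rIdx = 0 then R - rIdx
  else
    let i := (PySem.List.pyGet? coords 0).getD 0
    let j := (PySem.List.pyGet? coords 1).getD 0
    R - tiltLoopA matrix j (i.toNat + 1) i rIdx

-- ===== PORT B =====
def tiltNorthScore_alt (rIdx : Int) (coords : List Int) (matrix : List (List String)) : Int :=
  let R : Int := matrix.length
  if rIdx = 0 then R
  else
    let j := (PySem.List.pyGet? coords 1).getD 0
    let col := (PySem.List.pyRange 0 ((PySem.List.pyGet? coords 0).getD 0) 1).map (fun r => pvCell matrix j r)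
    let blk := (PySem.List.enumerate col).foldl (fun b rc => if rc.2 = "#" then rc.1 else b) (-1)
    R - rIdx + (PySem.List.count (PySem.List.slice col (some (blk + 1)) none) "." : Int)

-- ===== PRECONDITION & SPEC =====
-- Pre_ = where the Python A returns normally: coords has two entries, coords[0] stays in Python-index range of
-- matrix (the scan reaches index coords[0]-1, possibly negative), and coords[1] is a valid Python index in every
-- row the scan COULD touch (rows 0..coords[0]-1, the last row, and the wrapped row matrix[coords[0]-1] when
-- coords[0] ≤ 0). This slightly narrows A's domain: on a ragged matrix where a '#' shields a short row A still
-- returns (and B raises building the whole column) — see the cite in claim.json.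
def Pre_tiltNorthScore (rIdx : Int) (coords : List Int) (matrix : List (List String)) : Prop :=
  rIdx = 0 ∨
    (2 ≤ coords.length ∧ matrix ≠ [] ∧
     (PySem.List.pyGet? coords 0).getD 0 ≤ (matrix.length : Int) ∧
     1 - (matrix.length : Int) ≤ (PySem.List.pyGet? coords 0).getD 0 ∧
     (∀ row ∈ matrix.take ((PySem.List.pyGet? coords 0).getD 0).toNat,
        PySem.Raise.InRange row.length ((PySem.List.pyGet? coords 1).getD 0)) ∧
     PySem.Raise.InRange (matrix.getLastD []).length ((PySem.List.pyGet? coords 1).getD 0) ∧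
     ((PySem.List.pyGet? coords 0).getD 0 ≤ 0 →
        PySem.Raise.InRange ((PySem.List.pyGet? matrix ((PySem.List.pyGet? coords 0).getD 0 - 1)).getD []).length
          ((PySem.List.pyGet? coords 1).getD 0)))

instance (rIdx : Int) (coords : List Int) (matrix : List (List String)) : Decidable (Pre_tiltNorthScore rIdx coords matrix) := by unfold Pre_tiltNorthScore; infer_instance

def pvWitness_tiltNorthScore : Int × List Int × List (List String) := (1, [1, 0], [["."], ["O"]])

def Spec_tiltNorthScore (rIdx : Int) (coords : List Int) (matrix : List (List String)) (out : Int) : Prop := out = tiltNorthScore_alt rIdx coords matrix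
instance (rIdx : Int) (coords : List Int) (matrix : List (List String)) (out : Int) : Decidable (Spec_tiltNorthScore rIdx coords matrix out) := by unfold Spec_tiltNorthScore; infer_instance

-- ===== CLAIM (what is proved, stated in full; the proofs are below) =====
def Claim_equal_tiltNorthScore : Prop := ∀ (rIdx : Int) (coords : List Int) (matrix : List (List String)), Dom_tiltNorthScore rIdx coords matrix → Pre_tiltNorthScore rIdx coords matrix → Spec_tiltNorthScore rIdx coords matrix (tiltNorthScore rIdx coords matrix)

-- ===== LEMMAS AND PROOFS =====

-- abstract value of A's loop: dots seen above the rock, below the nearest block, among cells 0..k-1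
def pvG (cell : Int → String) : Nat → Int
  | 0 => 0
  | k + 1 => if cell k = "#" then 0 else pvG cell k + (if cell k = "." then 1 else 0)

-- B's locate step, on an abstract column
def pvBlk (l : List String) : Int :=
  (PySem.List.enumerate l).foldl (fun b rc => if rc.2 = "#" then rc.1 else b) (-1)

-- B's count step
def pvDots (l : List String) : Int :=
  (PySem.List.count (PySem.List.slice l (some (pvBlk l + 1)) none) "." : Int)

theorem pvBlk_snoc (l : List String) (c : String) :
    pvBlk (l ++ [c]) = if c = "#" then (l.length : Int) else pvBlk l := by
  unfold pvBlk
  rw [PySem.List.enumerate_append, List.foldl_append]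
  simp [PySem.List.enumerate]

theorem pvBlk_bound (l : List String) : -1 ≤ pvBlk l ∧ pvBlk l < (l.length : Int) ∨ pvBlk l = -1 := by
  induction l using List.reverseRecOn with
  | nil => right; rfl
  | append_singleton l c ih =>
    rw [pvBlk_snoc]
    rcases ih with h | h <;> split <;> simp_all <;> omega

theorem pvDots_snoc (l : List String) (c : String) :
    pvDots (l ++ [c]) = if c = "#" then 0 else pvDots l + (if c = "." then 1 else 0) := by
  unfold pvDots
  rw [pvBlk_snoc]
  by_cases hc : c = "#"
  · simp only [hc, if_true]
    have hcast : ((l.length : Int) + 1) = ((l.length + 1 : Nat) : Int) := by push_cast; ring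
    rw [hcast, PySem.List.slice_from_natCast]
    have hnil : List.drop (l.length + 1) (l ++ ["#"]) = [] := List.drop_eq_nil_of_le (by simp)
    rw [hnil]; simp [PySem.List.count_eq]
  · have hb : -1 ≤ pvBlk l ∧ pvBlk l < (l.length : Int) ∨ pvBlk l = -1 := pvBlk_bound l
    have h0 : 0 ≤ pvBlk l + 1 := by rcases hb with h | h <;> omega
    have hle : (pvBlk l + 1).toNat ≤ l.length := by rcases hb with h | h <;> omega
    rw [if_neg hc, PySem.List.slice_from _ h0, PySem.List.slice_from _ h0,
        List.drop_append_of_le_length hle]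
    simp [PySem.List.count_eq, List.count_append]
    split <;> simp_all [List.count_singleton]

theorem pvDots_range (cell : Int → String) (k : Nat) :
    pvDots ((PySem.List.pyRange 0 (k : Int) 1).map cell) = pvG cell k := by
  induction k with
  | zero =>
    simp [PySem.List.pyRange_one_eq_nil (by omega : (0 : Int) ≤ 0), pvG, pvDots, pvBlk,
          PySem.List.slice, PySem.List.count]
  | succ n ih =>
    have hcast : ((n + 1 : Nat) : Int) = (n : Int) + 1 := by push_cast; ring
    rw [hcast, PySem.List.pyRange_one_succ_right (by positivity), List.map_append, List.map_singleton,
        pvDots_snoc, ih]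
    simp [pvG]

theorem tiltLoopA_eq (matrix : List (List String)) (j : Int) (k : Nat) :
    ∀ r : Int, tiltLoopA matrix j (k + 1) (k : Int) r = r - pvG (pvCell matrix j) k := by
  induction k with
  | zero => intro r; simp [tiltLoopA, pvG]
  | succ n ih =>
    intro r
    have hcast : ((n + 1 : Nat) : Int) - 1 = (n : Int) := by push_cast; ring
    have hnn : ¬ ((n : Int) < 0) := by omega
    rw [show (n + 1 + 1 : Nat) = (n + 1) + 1 from rfl, tiltLoopA]
    simp only [hcast]
    by_cases hH : pvCell matrix j (n : Int) = "#"
    · rw [if_pos (Or.inl hH)]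
      simp [pvG, hH]
    · rw [if_neg (by tauto)]
      by_cases hD : pvCell matrix j (n : Int) = "."
      · have hO : ¬ (pvCell matrix j (n : Int) = "O" ∧ (n : Int) > 0) := by
          simp [hD]
        rw [if_neg hO, if_pos hD, ih]
        simp [pvG, hH, hD]; ring
      · by_cases hO : pvCell matrix j (n : Int) = "O" ∧ (n : Int) > 0
        · rw [if_pos hO, ih]
          simp [pvG, hH, hD]
        · rw [if_neg hO, if_neg hD, ih]
          simp [pvG, hH, hD]

-- ===== VERDICT (by name: the statement is the Claim_ definition above) =====
theorem tiltNorthScore_spec : Claim_equal_tiltNorthScore := by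
  intro rIdx coords matrix _hdom _hpre
  unfold Spec_tiltNorthScore tiltNorthScore tiltNorthScore_alt
  by_cases h0 : rIdx = 0
  · simp [h0]
  · simp only [if_neg h0]
    set i0 := (PySem.List.pyGet? coords 0).getD 0 with hi0
    set j := (PySem.List.pyGet? coords 1).getD 0 with hj
    by_cases hneg : i0 < 0
    · have ht : i0.toNat = 0 := by omega
      rw [ht]
      have hnil : PySem.List.pyRange 0 i0 1 = [] := PySem.List.pyRange_one_eq_nil (by omega)
      rw [hnil]
      have : tiltLoopA matrix j (0 + 1) i0 rIdx = rIdx := by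
        rw [tiltLoopA, if_pos (Or.inr (by omega))]
      rw [this]
      simp [PySem.List.slice, PySem.List.count]
    · obtain ⟨k, hk⟩ : ∃ k : Nat, i0 = (k : Int) := ⟨i0.toNat, by omega⟩
      rw [hk, Int.toNat_natCast, tiltLoopA_eq matrix j k rIdx]
      have hd := pvDots_range (pvCell matrix j) k
      unfold pvDots pvBlk at hd
      rw [hd]
      ring
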